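-- pv_equiv track=rewrite | github.com/dickymoore/macs | tools/orchestration/routing.py | _surface_version_failure_labels
-- ===== SOURCE A (Python) =====
-- def _surface_version_failure_labels(reasons: set[str]) -> list[str]:
--     labels = []
--     for prefix, label in (
--         ("surface_version_pin_mismatch:", "mismatch"),
--         ("surface_version_evidence_missing:", "missing evidence"),
--         ("surface_version_evidence_stale:", "stale evidence"),
--         ("surface_version_evidence_untrusted:", "low-trust evidence"),
--     ):
--         if any(reason.startswith(prefix) for reason in reasons):
--             labels.append(label)
--     return labels
-- ===== SOURCE B (Python) =====
-- _KEY_RANK = {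
--     "surface_version_pin_mismatch:": 0,
--     "surface_version_evidence_missing:": 1,
--     "surface_version_evidence_stale:": 2,
--     "surface_version_evidence_untrusted:": 3,
-- }
-- _ORDERED_LABELS = ("mismatch", "missing evidence", "stale evidence", "low-trust evidence")
--
--
-- def _surface_version_failure_labels(reasons):
--     # Parse the key out of each reason (everything up to and including the first
--     # colon) and classify it with one hash lookup instead of testing prefixes.
--     ranks = set()
--     for reason in reasons:
--         i = reason.find(":")
--         if i != -1:
--             rank = _KEY_RANK.get(reason[: i + 1])
--             if rank is not None:
--                 ranks.add(rank)
--     return [label for rank, label in enumerate(_ORDERED_LABELS) if rank in ranks]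
-- ===== Notes on version B (the rewrite author's own statement) =====
-- stated objective: faster
-- what changed: Instead of testing each of the four prefixes with a separate any()-scan over reasons, B parses each reason's key (the text up to and including its first colon) and classifies it with a single dict lookup, collecting matched ranks in a set and emitting the fixed labels by rank.
import Mathlib
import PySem

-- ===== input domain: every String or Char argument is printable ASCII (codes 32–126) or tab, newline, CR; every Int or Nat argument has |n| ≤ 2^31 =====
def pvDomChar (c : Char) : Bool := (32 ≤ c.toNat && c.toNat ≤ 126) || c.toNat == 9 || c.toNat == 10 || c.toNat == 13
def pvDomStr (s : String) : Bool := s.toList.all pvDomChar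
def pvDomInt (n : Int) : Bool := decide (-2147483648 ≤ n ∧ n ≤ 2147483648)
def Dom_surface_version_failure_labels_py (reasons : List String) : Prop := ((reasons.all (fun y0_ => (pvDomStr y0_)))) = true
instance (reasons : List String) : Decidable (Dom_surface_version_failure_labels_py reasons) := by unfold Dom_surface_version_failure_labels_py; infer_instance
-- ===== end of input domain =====

-- B replaces A's four prefix any()-scans by parsing each reason's key (text up to and including
-- its first colon) and classifying it with one dict lookup; matched ranks are collected in a set
-- and the fixed labels emitted by rank (objective: alternative algorithm, same exact output).

-- ===== PORT A =====
def surface_version_failure_labels_py (reasons : List String) : List String :=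
  [("surface_version_pin_mismatch:", "mismatch"),
   ("surface_version_evidence_missing:", "missing evidence"),
   ("surface_version_evidence_stale:", "stale evidence"),
   ("surface_version_evidence_untrusted:", "low-trust evidence")].foldl
    (fun labels pl =>
      if reasons.any (fun reason => PySem.Str.startswith reason pl.1) then labels ++ [pl.2]
      else labels) []

-- ===== PORT B =====
def pvKeyRank : PySem.Dict String Int :=
  PySem.Dict.mk
    [("surface_version_pin_mismatch:", 0),
     ("surface_version_evidence_missing:", 1),
     ("surface_version_evidence_stale:", 2),
     ("surface_version_evidence_untrusted:", 3)]

def pvOrderedLabels : List String :=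
  ["mismatch", "missing evidence", "stale evidence", "low-trust evidence"]

-- the single pass: the set of ranks whose key some reason carries
def pvRanks (reasons : List String) : PySem.Set Int :=
  reasons.foldl
    (fun ranks reason =>
      let i := PySem.Str.find reason ":"
      if i ≠ -1 then
        match PySem.Dict.get? pvKeyRank (PySem.Str.slice reason none (some (i + 1))) with
        | some rank => PySem.Set.add ranks rank
        | none => ranks
      else ranks)
    PySem.Set.empty

def surface_version_failure_labels_py_alt (reasons : List String) : List String :=
  (PySem.List.enumerate pvOrderedLabels).filterMap
    (fun p => if PySem.Set.contains (pvRanks reasons) p.1 then some p.2 else none)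

-- ===== PRECONDITION & SPEC =====
def Spec_surface_version_failure_labels_py (reasons : List String) (out : List String) : Prop := out = surface_version_failure_labels_py_alt reasons
instance (reasons : List String) (out : List String) : Decidable (Spec_surface_version_failure_labels_py reasons out) := by unfold Spec_surface_version_failure_labels_py; infer_instance

-- ===== CLAIM (what is proved, stated in full; the proofs are below) =====
def Claim_equal_surface_version_failure_labels_py : Prop := ∀ (reasons : List String), Dom_surface_version_failure_labels_py reasons → Spec_surface_version_failure_labels_py reasons (surface_version_failure_labels_py reasons)

-- ===== LEMMAS AND PROOFS =====

-- B's per-reason classifier, named for the proofs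
def pvStep (reason : String) : Option Int :=
  let i := PySem.Str.find reason ":"
  if i ≠ -1 then PySem.Dict.get? pvKeyRank (PySem.Str.slice reason none (some (i + 1)))
  else none

lemma mem_pvRanks (reasons : List String) (k : Int) :
    k ∈ pvRanks reasons ↔ ∃ r ∈ reasons, pvStep r = some k := by
  unfold pvRanks
  have key : ∀ (m : PySem.Set Int),
      k ∈ reasons.foldl
        (fun ranks reason =>
          let i := PySem.Str.find reason ":"
          if i ≠ -1 then
            match PySem.Dict.get? pvKeyRank (PySem.Str.slice reason none (some (i + 1))) with
            | some rank => PySem.Set.add ranks rank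
            | none => ranks
          else ranks) m ↔
      k ∈ m ∨ ∃ r ∈ reasons, pvStep r = some k := by
    induction reasons with
    | nil => simp
    | cons r rs ih =>
      intro m
      simp only [List.foldl_cons, ih, List.mem_cons]
      have hstep : (let i := PySem.Str.find r ":"
          if i ≠ -1 then
            match PySem.Dict.get? pvKeyRank (PySem.Str.slice r none (some (i + 1))) with
            | some rank => PySem.Set.add m rank
            | none => m
          else m) = match pvStep r with
            | some rank => PySem.Set.add m rank
            | none => m := by
        unfold pvStep
        dsimp only
        split_ifs with h
        · rfl
        · rfl
      rw [hstep]
      rcases hs : pvStep r with _ | rank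
      · constructor
        · rintro (h | ⟨r', hr', h'⟩)
          · exact Or.inl h
          · exact Or.inr ⟨r', Or.inr hr', h'⟩
        · rintro (h | ⟨r', hr' | hr', h'⟩)
          · exact Or.inl h
          · rw [hr'] at h'; rw [hs] at h'; cases h'
          · exact Or.inr ⟨r', hr', h'⟩
      · rw [PySem.Set.mem_add]
        constructor
        · rintro ((h | rfl) | ⟨r', hr', h'⟩)
          · exact Or.inl h
          · exact Or.inr ⟨r, Or.inl rfl, hs⟩
          · exact Or.inr ⟨r', Or.inr hr', h'⟩
        · rintro (h | ⟨r', hr' | hr', h'⟩)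
          · exact Or.inl (Or.inl h)
          · rw [hr'] at h'; rw [hs] at h'
            exact Or.inl (Or.inr (Option.some_inj.mp h').symm)
          · exact Or.inr ⟨r', hr', h'⟩
  rw [key PySem.Set.empty]
  simp [PySem.Set.empty]

lemma singleton_prefix_iff (c : Char) (l : List Char) : [c] <+: l ↔ l.head? = some c := by
  cases l with
  | nil => simp
  | cons a t =>
    constructor
    · rintro ⟨u, hu⟩
      simp only [List.cons_append, List.nil_append, List.cons.injEq] at hu
      simp [hu.1]
    · intro h
      simp only [List.head?_cons, Option.some_inj] at h
      exact ⟨t, by simp [h]⟩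

-- chars-level key lemma: for a key q ++ [':'] with no earlier colon, B's parse-and-compare
-- succeeds exactly where Python's startswith does
lemma key_iff (r q : List Char) (hq : ':' ∉ q) :
    (PySem.Chars.find r [':'] ≠ -1 ∧
      r.take (PySem.Chars.find r [':'] + 1).toNat = q ++ [':']) ↔ (q ++ [':']) <+: r := by
  constructor
  · rintro ⟨hne, htake⟩
    rw [← htake]
    exact List.take_prefix _ r
  · intro hpre
    have hocc : [':'] <+: r.drop q.length := by
      rw [singleton_prefix_iff, List.head?_drop]
      rcases hpre with ⟨t, rfl⟩
      simp
    have hne : PySem.Chars.find r [':'] ≠ -1 := by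
      rw [PySem.Chars.find_ne_neg_one_iff]
      exact (hocc.isInfix).trans ((List.drop_suffix _ _).isInfix)
    have hnonneg : 0 ≤ PySem.Chars.find r [':'] := by
      have := PySem.Chars.neg_one_le_find (s := r) (sub := [':'])
      omega
    obtain ⟨hfst, hmin⟩ := PySem.Chars.find_spec (s := r) (sub := [':']) hnonneg
    set i := (PySem.Chars.find r [':']).toNat with hi
    have hile : i ≤ q.length := by
      by_contra hlt
      exact hmin q.length (by omega) hocc
    have hige : ¬ i < q.length := by
      intro hlt
      have hchar : r.head?.isSome → True := fun _ => trivial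
      have : r[i]? = some ':' := by
        rw [← List.head?_drop]
        exact (singleton_prefix_iff ':' (r.drop i)).mp hfst
      have hq_at : r[i]? = q[i]? := by
        rcases hpre with ⟨t, rfl⟩
        rw [List.getElem?_append_left (by simp; omega)]
        rw [List.getElem?_append_left hlt]
      rw [hq_at] at this
      exact hq (List.mem_of_getElem? this)
    have hieq : i = q.length := by omega
    have hlen : q.length + 1 ≤ r.length := by
      have := hocc
      rcases hpre with ⟨t, rfl⟩
      simp
    refine ⟨hne, ?_⟩
    have hcast : (PySem.Chars.find r [':'] + 1).toNat = i + 1 := by omega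
    rw [hcast, hieq]
    have := List.prefix_iff_eq_take.mp hpre
    simpa using this.symm

-- per-reason equivalence, one instance per table row
lemma step_iff (r : String) (q : List Char) (key : String) (k : Int)
    (hkey : key.toList = q ++ [':']) (hq : ':' ∉ q)
    (hget : ∀ s : String, PySem.Dict.get? pvKeyRank s = some k ↔ s = key) :
    pvStep r = some k ↔ PySem.Str.startswith r key = true := by
  unfold pvStep
  dsimp only
  rw [PySem.Str.startswith_eq, PySem.Chars.startswith_iff, hkey, ← key_iff r.toList q hq]
  have hfind : PySem.Str.find r ":" = PySem.Chars.find r.toList [':'] := rfl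
  have h0 : (0:Int) ≤ PySem.Str.find r ":" + 1 := by
    have := PySem.Chars.neg_one_le_find (s := r.toList) (sub := [':'])
    rw [hfind]; omega
  have hsl : (PySem.Str.slice r none (some (PySem.Str.find r ":" + 1))).toList
      = r.toList.take (PySem.Chars.find r.toList [':'] + 1).toNat := by
    rw [PySem.Str.toList_slice, PySem.Chars.slice_eq_listSlice, PySem.List.slice_to _ h0, hfind]
  constructor
  · intro h
    split_ifs at h with hne
    · rw [hget] at h
      refine ⟨by rw [← hfind]; exact hne, ?_⟩
      rw [← hsl, h, hkey]
  · rintro ⟨hne, htake⟩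
    rw [if_pos (show PySem.Str.find r ":" ≠ -1 by rw [hfind]; exact hne)]
    rw [hget, ← String.toList_inj, hkey, hsl, htake]

lemma cond_eq (reasons : List String) (q : List Char) (key : String) (k : Int)
    (hkey : key.toList = q ++ [':']) (hq : ':' ∉ q)
    (hget : ∀ s : String, PySem.Dict.get? pvKeyRank s = some k ↔ s = key) :
    PySem.Set.contains (pvRanks reasons) k
      = reasons.any (fun reason => PySem.Str.startswith reason key) := by
  rw [Bool.eq_iff_iff, PySem.Set.contains_iff, mem_pvRanks, List.any_eq_true]
  constructor
  · rintro ⟨r, hr, h⟩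
    exact ⟨r, hr, (step_iff r q key k hkey hq hget).mp h⟩
  · rintro ⟨r, hr, h⟩
    exact ⟨r, hr, (step_iff r q key k hkey hq hget).mpr h⟩

set_option maxRecDepth 100000 in
lemma get?_pvKeyRank (s : String) (k : Int) (key : String)
    (hk : (k = 0 ∧ key = "surface_version_pin_mismatch:") ∨
          (k = 1 ∧ key = "surface_version_evidence_missing:") ∨
          (k = 2 ∧ key = "surface_version_evidence_stale:") ∨
          (k = 3 ∧ key = "surface_version_evidence_untrusted:")) :
    PySem.Dict.get? pvKeyRank s = some k ↔ s = key := by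
  unfold pvKeyRank
  simp only [PySem.Dict.get?_mk_cons, beq_iff_eq]
  rcases hk with ⟨rfl, rfl⟩ | ⟨rfl, rfl⟩ | ⟨rfl, rfl⟩ | ⟨rfl, rfl⟩ <;>
    · split_ifs with h1 h2 h3 h4 <;> simp_all [eq_comm, show ∀ t : String, (PySem.Dict.mk ([] : List (String × Int))).get? t = none from fun t => PySem.Dict.get?_empty ..]

-- ===== VERDICT (by name: the statement is the Claim_ definition above) =====
theorem surface_version_failure_labels_py_spec : Claim_equal_surface_version_failure_labels_py := by
  intro reasons _
  unfold Spec_surface_version_failure_labels_py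
  have h0 := cond_eq reasons ("surface_version_pin_mismatch".toList) "surface_version_pin_mismatch:" 0
    (by decide) (by decide) (fun s => get?_pvKeyRank s 0 _ (by norm_num))
  have h1 := cond_eq reasons ("surface_version_evidence_missing".toList) "surface_version_evidence_missing:" 1
    (by decide) (by decide) (fun s => get?_pvKeyRank s 1 _ (by norm_num))
  have h2 := cond_eq reasons ("surface_version_evidence_stale".toList) "surface_version_evidence_stale:" 2
    (by decide) (by decide) (fun s => get?_pvKeyRank s 2 _ (by norm_num))
  have h3 := cond_eq reasons ("surface_version_evidence_untrusted".toList) "surface_version_evidence_untrusted:" 3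
    (by decide) (by decide) (fun s => get?_pvKeyRank s 3 _ (by norm_num))
  unfold surface_version_failure_labels_py surface_version_failure_labels_py_alt
  have e : PySem.List.enumerate pvOrderedLabels
      = [((0:Int), "mismatch"), (1, "missing evidence"), (2, "stale evidence"), (3, "low-trust evidence")] := by
    simp [pvOrderedLabels, PySem.List.enumerate_cons, PySem.List.enumerate_nil]
  rw [e]
  simp only [List.filterMap_cons, List.filterMap_nil, List.foldl_cons, List.foldl_nil]
  rw [h0, h1, h2, h3]
  split_ifs <;> rfl
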